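-- pv_equiv track=rewrite | github.com/Mahajan-Sachin/email-triage-env | inference.py | _rule_based_action
-- ===== SOURCE A (Python) =====
-- from typing import Any, Dict, List, Optional
--
-- def _rule_based_action(obs: Dict[str, Any], step: int) -> Dict[str, Any]:
--     """Used when LLM call fails — ensures episode always completes."""
--     subject = (obs.get("email_subject") or "").lower()
--     body    = (obs.get("email_body")    or "").lower()
--     text    = subject + " " + body
--
--     # Step 1 fallback
--     if step == 1:
--         if any(k in text for k in ["lottery","winner","free money","congratulations","selected for"]):
--             return {"action_type": "categorize", "category": "spam"}
--         if any(k in text for k in ["invoice","refund","charge","billing","gstin","payment"]):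
--             return {"action_type": "categorize", "category": "billing"}
--         if any(k in text for k in ["pricing","plan","enterprise","partnership","seats"]):
--             return {"action_type": "categorize", "category": "sales"}
--         if any(k in text for k in ["all-hands","agenda","infosec@","hr@"]):
--             return {"action_type": "categorize", "category": "internal"}
--         return {"action_type": "categorize", "category": "support"}
--
--     # Step 2 fallback
--     if step == 2:
--         if any(k in text for k in ["urgent","sla","breach","immediately","today","lawsuit"]):
--             return {"action_type": "set_priority", "priority": "urgent"}
--         if any(k in text for k in ["enterprise","2000","partnership","series a","incorrect charge"]):
--             return {"action_type": "set_priority", "priority": "high"}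
--         if any(k in text for k in ["spam","lottery","all-hands"]):
--             return {"action_type": "set_priority", "priority": "low"}
--         return {"action_type": "set_priority", "priority": "medium"}
--
--     # Step 3+ fallback (terminal action)
--     cat = obs.get("current_category", "")
--     if cat == "spam" or any(k in text for k in ["lottery","all-hands","congratulations","free money"]):
--         return {"action_type": "archive"}
--     if any(k in text for k in ["sla","legal","breach","gdpr","dispute","bank","executive","4th time"]):
--         return {
--             "action_type": "escalate",
--             "escalation_reason": (
--                 f"Urgent issue from {obs.get('sender','unknown')}: requires immediate "
--                 "management/legal/engineering attention due to SLA breach, regulatory "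
--                 "implications, or high-value business risk."
--             ),
--         }
--     return {
--         "action_type": "draft_reply",
--         "reply_draft": (
--             f"Dear Customer,\n\n"
--             f"Thank you for reaching out about '{obs.get('email_subject', 'your inquiry')}'. "
--             f"We have received your message and our team is actively reviewing it. "
--             f"We sincerely apologise for any inconvenience and will provide a resolution "
--             f"within 1–2 business days.\n\n"
--             f"Please don't hesitate to contact us if you need further assistance.\n\n"
--             f"Best regards,\nCustomer Support Team"
--         ),
--     }
-- ===== SOURCE B (Python) =====
-- # Min-rank rewrite: instead of an ordered cascade of if/any tests, each step owns one
-- # flat keyword->rank map; a single scan computes the smallest matched rank, which then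
-- # indexes a result table. Correct because A's first matching rule is exactly the rule
-- # of minimal rank among those with a keyword occurring in the text.
--
-- _STEP1_PAIRS = [
--     ("lottery", 0), ("winner", 0), ("free money", 0), ("congratulations", 0), ("selected for", 0),
--     ("invoice", 1), ("refund", 1), ("charge", 1), ("billing", 1), ("gstin", 1), ("payment", 1),
--     ("pricing", 2), ("plan", 2), ("enterprise", 2), ("partnership", 2), ("seats", 2),
--     ("all-hands", 3), ("agenda", 3), ("infosec@", 3), ("hr@", 3),
-- ]
-- _CATS = ["spam", "billing", "sales", "internal", "support"]
--
-- _STEP2_PAIRS = [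
--     ("urgent", 0), ("sla", 0), ("breach", 0), ("immediately", 0), ("today", 0), ("lawsuit", 0),
--     ("enterprise", 1), ("2000", 1), ("partnership", 1), ("series a", 1), ("incorrect charge", 1),
--     ("spam", 2), ("lottery", 2), ("all-hands", 2),
-- ]
-- _PRIOS = ["urgent", "high", "low", "medium"]
--
-- _STEP3_PAIRS = [
--     ("lottery", 0), ("all-hands", 0), ("congratulations", 0), ("free money", 0),
--     ("sla", 1), ("legal", 1), ("breach", 1), ("gdpr", 1), ("dispute", 1), ("bank", 1),
--     ("executive", 1), ("4th time", 1),
-- ]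
--
--
-- def _matched_rank(text, pairs, default_rank):
--     """Smallest rank whose keyword occurs in text, else default_rank."""
--     rank = default_rank
--     for k, r in pairs:
--         if k in text and r < rank:
--             rank = r
--     return rank
--
--
-- def _archive(obs):
--     return {"action_type": "archive"}
--
--
-- def _escalate(obs):
--     return {
--         "action_type": "escalate",
--         "escalation_reason": (
--             f"Urgent issue from {obs.get('sender','unknown')}: requires immediate "
--             "management/legal/engineering attention due to SLA breach, regulatory "
--             "implications, or high-value business risk."
--         ),
--     }
--
--
-- def _draft(obs):
--     return {
--         "action_type": "draft_reply",
--         "reply_draft": (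
--             f"Dear Customer,\n\n"
--             f"Thank you for reaching out about '{obs.get('email_subject', 'your inquiry')}'. "
--             f"We have received your message and our team is actively reviewing it. "
--             f"We sincerely apologise for any inconvenience and will provide a resolution "
--             f"within 1–2 business days.\n\n"
--             f"Please don't hesitate to contact us if you need further assistance.\n\n"
--             f"Best regards,\nCustomer Support Team"
--         ),
--     }
--
--
-- def _rule_based_action(obs, step):
--     subject = (obs.get("email_subject") or "").lower()
--     body    = (obs.get("email_body")    or "").lower()
--     text    = subject + " " + body
--
--     if step == 1:
--         rank = _matched_rank(text, _STEP1_PAIRS, 4)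
--         return {"action_type": "categorize", "category": _CATS[rank]}
--     if step == 2:
--         rank = _matched_rank(text, _STEP2_PAIRS, 3)
--         return {"action_type": "set_priority", "priority": _PRIOS[rank]}
--
--     # Step 3+: terminal action, picked from a table of result builders.
--     if obs.get("current_category", "") == "spam":
--         rank = 0
--     else:
--         rank = _matched_rank(text, _STEP3_PAIRS, 2)
--     return [_archive, _escalate, _draft][rank](obs)
-- ===== Notes on version B (the rewrite author's own statement) =====
-- stated objective: alternative
-- what changed: Replaced A's ordered if/any rule cascade by flat keyword->rank tables: one scan computes the minimal matched rank, which indexes a result table (step 3's table holds result-builder functions).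
import Mathlib
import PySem

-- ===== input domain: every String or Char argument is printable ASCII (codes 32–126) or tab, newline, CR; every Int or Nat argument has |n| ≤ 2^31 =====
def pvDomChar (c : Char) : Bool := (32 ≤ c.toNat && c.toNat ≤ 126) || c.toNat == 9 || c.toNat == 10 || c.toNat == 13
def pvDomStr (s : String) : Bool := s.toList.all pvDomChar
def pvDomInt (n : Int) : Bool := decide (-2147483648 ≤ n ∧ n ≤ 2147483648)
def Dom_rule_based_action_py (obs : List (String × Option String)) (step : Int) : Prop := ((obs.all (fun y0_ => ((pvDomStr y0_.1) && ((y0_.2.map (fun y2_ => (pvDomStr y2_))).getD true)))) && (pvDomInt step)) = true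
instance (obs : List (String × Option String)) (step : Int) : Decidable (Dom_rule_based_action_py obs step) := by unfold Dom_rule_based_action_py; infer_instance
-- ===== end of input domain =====

-- B replaces A's ordered if/any cascade by flat keyword->rank tables: one scan computes the
-- smallest matched rank, which indexes a result table (objective: alternative); values identical.

-- ===== PORT A =====

-- any(k in text for k in ks)
def pvHit (ks : List String) (text : List Char) : Bool :=
  ks.any (fun k => PySem.Chars.isIn k.toList text)

-- f"{obs.get(k, dflt)}": missing key → dflt, stored None prints "None", else the string
def pvFmtGet (v : Option (Option String)) (dflt : String) : String :=
  match v with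
  | none => dflt
  | some none => "None"
  | some (some s) => s

def rule_based_action_py (obs : List (String × Option String)) (step : Int) : List (String × String) :=
  let d : PySem.Dict String (Option String) := PySem.Dict.mk obs
  -- (obs.get(k) or "").lower(): None and "" both give "", so getD "" is exact
  let subject := PySem.Chars.lower (((d.get? "email_subject").getD none).getD "").toList
  let body    := PySem.Chars.lower (((d.get? "email_body").getD none).getD "").toList
  let text    := subject ++ [' '] ++ body
  if step == 1 then
    if pvHit ["lottery", "winner", "free money", "congratulations", "selected for"] text then
      [("action_type", "categorize"), ("category", "spam")]
    else if pvHit ["invoice", "refund", "charge", "billing", "gstin", "payment"] text then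
      [("action_type", "categorize"), ("category", "billing")]
    else if pvHit ["pricing", "plan", "enterprise", "partnership", "seats"] text then
      [("action_type", "categorize"), ("category", "sales")]
    else if pvHit ["all-hands", "agenda", "infosec@", "hr@"] text then
      [("action_type", "categorize"), ("category", "internal")]
    else [("action_type", "categorize"), ("category", "support")]
  else if step == 2 then
    if pvHit ["urgent", "sla", "breach", "immediately", "today", "lawsuit"] text then
      [("action_type", "set_priority"), ("priority", "urgent")]
    else if pvHit ["enterprise", "2000", "partnership", "series a", "incorrect charge"] text then
      [("action_type", "set_priority"), ("priority", "high")]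
    else if pvHit ["spam", "lottery", "all-hands"] text then
      [("action_type", "set_priority"), ("priority", "low")]
    else [("action_type", "set_priority"), ("priority", "medium")]
  else
    let cat : Option String := (d.get? "current_category").getD (some "")
    if (cat == some "spam") || pvHit ["lottery", "all-hands", "congratulations", "free money"] text then
      [("action_type", "archive")]
    else if pvHit ["sla", "legal", "breach", "gdpr", "dispute", "bank", "executive", "4th time"] text then
      [("action_type", "escalate"),
       ("escalation_reason",
        "Urgent issue from " ++ pvFmtGet (d.get? "sender") "unknown" ++
        ": requires immediate management/legal/engineering attention due to SLA breach, regulatory implications, or high-value business risk.")]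
    else
      [("action_type", "draft_reply"),
       ("reply_draft",
        "Dear Customer,\n\nThank you for reaching out about '" ++
        pvFmtGet (d.get? "email_subject") "your inquiry" ++
        "'. We have received your message and our team is actively reviewing it. We sincerely apologise for any inconvenience and will provide a resolution within 1–2 business days.\n\nPlease don't hesitate to contact us if you need further assistance.\n\nBest regards,\nCustomer Support Team")]

-- ===== PORT B =====

def pvStep1Pairs : List (String × Nat) :=
  [("lottery", 0), ("winner", 0), ("free money", 0), ("congratulations", 0), ("selected for", 0),
   ("invoice", 1), ("refund", 1), ("charge", 1), ("billing", 1), ("gstin", 1), ("payment", 1),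
   ("pricing", 2), ("plan", 2), ("enterprise", 2), ("partnership", 2), ("seats", 2),
   ("all-hands", 3), ("agenda", 3), ("infosec@", 3), ("hr@", 3)]

def pvCats : List String := ["spam", "billing", "sales", "internal", "support"]

def pvStep2Pairs : List (String × Nat) :=
  [("urgent", 0), ("sla", 0), ("breach", 0), ("immediately", 0), ("today", 0), ("lawsuit", 0),
   ("enterprise", 1), ("2000", 1), ("partnership", 1), ("series a", 1), ("incorrect charge", 1),
   ("spam", 2), ("lottery", 2), ("all-hands", 2)]

def pvPrios : List String := ["urgent", "high", "low", "medium"]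

def pvStep3Pairs : List (String × Nat) :=
  [("lottery", 0), ("all-hands", 0), ("congratulations", 0), ("free money", 0),
   ("sla", 1), ("legal", 1), ("breach", 1), ("gdpr", 1), ("dispute", 1), ("bank", 1),
   ("executive", 1), ("4th time", 1)]

-- _matched_rank: smallest rank whose keyword occurs in text, else default_rank
def pvMinRank (text : List Char) : List (String × Nat) → Nat → Nat
  | [], rank => rank
  | (k, r) :: rest, rank =>
      pvMinRank text rest (if PySem.Chars.isIn k.toList text ∧ r < rank then r else rank)

def pvArchive (_d : PySem.Dict String (Option String)) : List (String × String) :=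
  [("action_type", "archive")]

def pvEscalate (d : PySem.Dict String (Option String)) : List (String × String) :=
  [("action_type", "escalate"),
   ("escalation_reason",
    "Urgent issue from " ++ pvFmtGet (d.get? "sender") "unknown" ++
    ": requires immediate management/legal/engineering attention due to SLA breach, regulatory implications, or high-value business risk.")]

def pvDraft (d : PySem.Dict String (Option String)) : List (String × String) :=
  [("action_type", "draft_reply"),
   ("reply_draft",
    "Dear Customer,\n\nThank you for reaching out about '" ++
    pvFmtGet (d.get? "email_subject") "your inquiry" ++
    "'. We have received your message and our team is actively reviewing it. We sincerely apologise for any inconvenience and will provide a resolution within 1–2 business days.\n\nPlease don't hesitate to contact us if you need further assistance.\n\nBest regards,\nCustomer Support Team")]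

def rule_based_action_py_alt (obs : List (String × Option String)) (step : Int) : List (String × String) :=
  let d : PySem.Dict String (Option String) := PySem.Dict.mk obs
  let subject := PySem.Chars.lower (((d.get? "email_subject").getD none).getD "").toList
  let body    := PySem.Chars.lower (((d.get? "email_body").getD none).getD "").toList
  let text    := subject ++ [' '] ++ body
  if step == 1 then
    -- _CATS[rank]: rank ≤ 4 < len(_CATS), so getD is exact
    let rank := pvMinRank text pvStep1Pairs 4
    [("action_type", "categorize"), ("category", pvCats.getD rank "support")]
  else if step == 2 then
    let rank := pvMinRank text pvStep2Pairs 3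
    [("action_type", "set_priority"), ("priority", pvPrios.getD rank "medium")]
  else
    let rank :=
      if ((d.get? "current_category").getD (some "") == some "spam") then 0
      else pvMinRank text pvStep3Pairs 2
    -- [_archive, _escalate, _draft][rank](obs): rank ≤ 2, so getD is exact
    ([pvArchive, pvEscalate, pvDraft].getD rank pvDraft) d

-- ===== PRECONDITION & SPEC =====
def Spec_rule_based_action_py (obs : List (String × Option String)) (step : Int) (out : List (String × String)) : Prop := out = rule_based_action_py_alt obs step
instance (obs : List (String × Option String)) (step : Int) (out : List (String × String)) : Decidable (Spec_rule_based_action_py obs step out) := by unfold Spec_rule_based_action_py; infer_instance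

-- ===== CLAIM (what is proved, stated in full; the proofs are below) =====
def Claim_equal_rule_based_action_py : Prop := ∀ (obs : List (String × Option String)) (step : Int), Dom_rule_based_action_py obs step → Spec_rule_based_action_py obs step (rule_based_action_py obs step)

-- ===== LEMMAS AND PROOFS =====

-- scanning one constant-rank block updates the accumulator iff any of its keywords hits
theorem pvMinRank_block (text : List Char) (ks : List String) (r : Nat)
    (rest : List (String × Nat)) (a : Nat) :
    pvMinRank text (ks.map (fun k => (k, r)) ++ rest) a
      = pvMinRank text rest (if pvHit ks text ∧ r < a then r else a) := by
  induction ks generalizing a with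
  | nil => simp [pvHit]
  | cons k ks ih =>
      simp only [List.map_cons, List.cons_append, pvMinRank, ih]
      congr 1
      by_cases hk : PySem.Chars.isIn k.toList text = true <;>
        by_cases hr : r < a <;>
        simp [pvHit, hk, hr]

theorem pvMinRank_nil (text : List Char) (a : Nat) : pvMinRank text [] a = a := rfl

-- per-step equalities, for an arbitrary search text / dict

theorem pvStep1_eq (text : List Char) :
    (if pvHit ["lottery", "winner", "free money", "congratulations", "selected for"] text then
      [("action_type", "categorize"), ("category", "spam")]
    else if pvHit ["invoice", "refund", "charge", "billing", "gstin", "payment"] text then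
      [("action_type", "categorize"), ("category", "billing")]
    else if pvHit ["pricing", "plan", "enterprise", "partnership", "seats"] text then
      [("action_type", "categorize"), ("category", "sales")]
    else if pvHit ["all-hands", "agenda", "infosec@", "hr@"] text then
      [("action_type", "categorize"), ("category", "internal")]
    else [("action_type", "categorize"), ("category", "support")])
    = [("action_type", "categorize"),
       ("category", pvCats.getD (pvMinRank text pvStep1Pairs 4) "support")] := by
  have e1 : pvStep1Pairs =
      (["lottery", "winner", "free money", "congratulations", "selected for"].map (fun k => (k, 0)))
      ++ ((["invoice", "refund", "charge", "billing", "gstin", "payment"].map (fun k => (k, 1)))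
      ++ ((["pricing", "plan", "enterprise", "partnership", "seats"].map (fun k => (k, 2)))
      ++ ((["all-hands", "agenda", "infosec@", "hr@"].map (fun k => (k, 3))) ++ []))) := rfl
  rw [e1, pvMinRank_block, pvMinRank_block, pvMinRank_block, pvMinRank_block, pvMinRank_nil]
  by_cases hA : pvHit ["lottery", "winner", "free money", "congratulations", "selected for"] text = true <;>
  by_cases hB : pvHit ["invoice", "refund", "charge", "billing", "gstin", "payment"] text = true <;>
  by_cases hC : pvHit ["pricing", "plan", "enterprise", "partnership", "seats"] text = true <;>
  by_cases hD : pvHit ["all-hands", "agenda", "infosec@", "hr@"] text = true <;>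
    simp [hA, hB, hC, hD, pvCats]

theorem pvStep2_eq (text : List Char) :
    (if pvHit ["urgent", "sla", "breach", "immediately", "today", "lawsuit"] text then
      [("action_type", "set_priority"), ("priority", "urgent")]
    else if pvHit ["enterprise", "2000", "partnership", "series a", "incorrect charge"] text then
      [("action_type", "set_priority"), ("priority", "high")]
    else if pvHit ["spam", "lottery", "all-hands"] text then
      [("action_type", "set_priority"), ("priority", "low")]
    else [("action_type", "set_priority"), ("priority", "medium")])
    = [("action_type", "set_priority"),
       ("priority", pvPrios.getD (pvMinRank text pvStep2Pairs 3) "medium")] := by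
  have e2 : pvStep2Pairs =
      (["urgent", "sla", "breach", "immediately", "today", "lawsuit"].map (fun k => (k, 0)))
      ++ ((["enterprise", "2000", "partnership", "series a", "incorrect charge"].map (fun k => (k, 1)))
      ++ ((["spam", "lottery", "all-hands"].map (fun k => (k, 2))) ++ [])) := rfl
  rw [e2, pvMinRank_block, pvMinRank_block, pvMinRank_block, pvMinRank_nil]
  by_cases hA : pvHit ["urgent", "sla", "breach", "immediately", "today", "lawsuit"] text = true <;>
  by_cases hB : pvHit ["enterprise", "2000", "partnership", "series a", "incorrect charge"] text = true <;>
  by_cases hC : pvHit ["spam", "lottery", "all-hands"] text = true <;>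
    simp [hA, hB, hC, pvPrios]

theorem pvStep3_eq (d : PySem.Dict String (Option String)) (text : List Char) :
    (if (((d.get? "current_category").getD (some "") == some "spam")
          || pvHit ["lottery", "all-hands", "congratulations", "free money"] text) then
      [("action_type", "archive")]
    else if pvHit ["sla", "legal", "breach", "gdpr", "dispute", "bank", "executive", "4th time"] text then
      pvEscalate d
    else pvDraft d)
    = ([pvArchive, pvEscalate, pvDraft].getD
        (if ((d.get? "current_category").getD (some "") == some "spam") then 0
         else pvMinRank text pvStep3Pairs 2) pvDraft) d := by
  have e3 : pvStep3Pairs =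
      (["lottery", "all-hands", "congratulations", "free money"].map (fun k => (k, 0)))
      ++ ((["sla", "legal", "breach", "gdpr", "dispute", "bank", "executive", "4th time"].map (fun k => (k, 1)))
      ++ []) := rfl
  rw [e3, pvMinRank_block, pvMinRank_block, pvMinRank_nil]
  by_cases hS : ((d.get? "current_category").getD (some "") == some "spam") = true <;>
  by_cases hA : pvHit ["lottery", "all-hands", "congratulations", "free money"] text = true <;>
  by_cases hB : pvHit ["sla", "legal", "breach", "gdpr", "dispute", "bank", "executive", "4th time"] text = true <;>
    simp [hS, hA, hB, pvArchive]

-- ===== VERDICT (by name: the statement is the Claim_ definition above) =====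
theorem rule_based_action_py_spec : Claim_equal_rule_based_action_py := by
  intro obs step _
  unfold Spec_rule_based_action_py rule_based_action_py rule_based_action_py_alt
  by_cases h1 : (step == 1) = true <;> by_cases h2 : (step == 2) = true <;>
    simp only [h1, h2, if_true, if_false, Bool.false_eq_true]
  · exact pvStep1_eq _
  · exact pvStep1_eq _
  · exact pvStep2_eq _
  · exact pvStep3_eq _ _
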